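-- pv_equiv track=rewrite | github.com/srahim457/glyPpy3 | glyP/utilities.py | order_layer
-- ===== SOURCE A (Python) =====
-- def order_layer(layer):
--   ord_layer=[]
--   ord_layer.append(layer[0][1])
--   del layer[:1]
--   for i,k in zip(layer[0::2], layer[1::2]):
--     temp = [i[1],k[1]]
--     temp.sort(key=lambda n:n[0])
--     midpoint = len(ord_layer)//2+1
--     ord_layer.insert(midpoint, temp[1])
--     ord_layer.insert(midpoint, temp[0])
--   midpoint = len(ord_layer)//2+1
--   ord_layer.insert(midpoint,layer[-1][1])
--   return ord_layer
-- ===== SOURCE B (Python) =====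
-- # B: two-bucket single-pass build instead of repeated midpoint insertions.
-- # Note: like A, mutates the argument (del layer[:1]); equivalence is about the return value.
-- def order_layer(layer):
--     e0 = layer[0][1]
--     del layer[:1]
--     a_list, b_list = [], []
--     for i, k in zip(layer[0::2], layer[1::2]):
--         if k[1][0] < i[1][0]:
--             lo, hi = k[1], i[1]
--         else:
--             lo, hi = i[1], k[1]
--         a_list.append(lo)
--         b_list.append(hi)
--     return [e0] + a_list + [layer[-1][1]] + b_list[::-1]
-- ===== Notes on version B (the rewrite author's own statement) =====
-- stated objective: alternative
-- what changed: Replaces the repeated midpoint list.insert construction with a single pass that buckets each pair's smaller element into a front list and its larger into a back list, then concatenates front + last element + reversed back.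
import Mathlib
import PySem

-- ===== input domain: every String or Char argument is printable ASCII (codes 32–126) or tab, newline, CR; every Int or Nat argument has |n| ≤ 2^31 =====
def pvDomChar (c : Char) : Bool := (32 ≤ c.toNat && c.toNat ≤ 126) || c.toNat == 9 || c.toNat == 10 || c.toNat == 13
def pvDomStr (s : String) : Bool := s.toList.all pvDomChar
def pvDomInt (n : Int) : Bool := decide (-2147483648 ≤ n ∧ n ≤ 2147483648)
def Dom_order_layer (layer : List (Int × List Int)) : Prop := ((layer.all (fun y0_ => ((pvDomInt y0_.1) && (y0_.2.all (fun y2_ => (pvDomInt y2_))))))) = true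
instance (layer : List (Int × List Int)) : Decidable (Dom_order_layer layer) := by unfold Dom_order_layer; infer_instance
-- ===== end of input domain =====

-- B replaces A's repeated midpoint insertions with a one-pass two-bucket build (alternative algorithm, same result);
-- both Pythons mutate the argument the same way (del layer[:1]); the claim is about the return value.

-- ===== PORT A =====
-- loop body of A: sort the pair by first element, insert both at the midpoint
def order_layer_aStep (ord : List (List Int)) (ik : (Int × List Int) × (Int × List Int)) : List (List Int) :=
  let temp := PySem.List.sorted [ik.1.2, ik.2.2] (fun n => (PySem.List.pyGet? n 0).getD 0) false
  let midpoint := PySem.Int.floordiv ((ord.length : Int)) 2 + 1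
  let ord1 := PySem.List.insert ord midpoint ((PySem.List.pyGet? temp 1).getD [])
  PySem.List.insert ord1 midpoint ((PySem.List.pyGet? temp 0).getD [])

def order_layer (layer : List (Int × List Int)) : List (List Int) :=
  let ord0 : List (List Int) := [((PySem.List.pyGet? layer 0).getD (0, [])).2]
  let rest := layer.tail  -- del layer[:1]
  let pairs := List.zip ((PySem.List.slice? rest (some 0) none 2).getD [])
                        ((PySem.List.slice? rest (some 1) none 2).getD [])
  let ordl := pairs.foldl order_layer_aStep ord0
  let midpoint := PySem.Int.floordiv ((ordl.length : Int)) 2 + 1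
  PySem.List.insert ordl midpoint (((PySem.List.pyGet? rest (-1)).getD (0, [])).2)

-- ===== PORT B =====
-- loop body of B: smaller of the pair into the front bucket, larger into the back bucket
def order_layer_bStep (ab : List (List Int) × List (List Int))
    (ik : (Int × List Int) × (Int × List Int)) : List (List Int) × List (List Int) :=
  if (PySem.List.pyGet? ik.2.2 0).getD 0 < (PySem.List.pyGet? ik.1.2 0).getD 0 then
    (ab.1 ++ [ik.2.2], ab.2 ++ [ik.1.2])
  else
    (ab.1 ++ [ik.1.2], ab.2 ++ [ik.2.2])

def order_layer_alt (layer : List (Int × List Int)) : List (List Int) :=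
  let e0 := ((PySem.List.pyGet? layer 0).getD (0, [])).2
  let rest := layer.tail  -- del layer[:1]
  let pairs := List.zip ((PySem.List.slice? rest (some 0) none 2).getD [])
                        ((PySem.List.slice? rest (some 1) none 2).getD [])
  let ab := pairs.foldl order_layer_bStep ([], [])
  [e0] ++ ab.1 ++ [((PySem.List.pyGet? rest (-1)).getD (0, [])).2] ++ ab.2.reverse

-- ===== PRECONDITION & SPEC =====
-- Pre_ excludes exactly the inputs on which the Python A raises: fewer than two elements
-- (layer[-1] after the del is an IndexError) or an empty inner list inside a zipped pair
-- (the sort key n[0] is an IndexError); Python B raises on the same inputs.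
def Pre_order_layer (layer : List (Int × List Int)) : Prop :=
  2 ≤ layer.length ∧
  ∀ p ∈ List.zip ((PySem.List.slice? layer.tail (some 0) none 2).getD [])
                 ((PySem.List.slice? layer.tail (some 1) none 2).getD []),
      p.1.2 ≠ [] ∧ p.2.2 ≠ []
instance (layer : List (Int × List Int)) : Decidable (Pre_order_layer layer) := by
  unfold Pre_order_layer; infer_instance
def pvWitness_order_layer : (List (Int × List Int)) := [(0, [1]), (1, [2]), (2, [3])]
def Spec_order_layer (layer : List (Int × List Int)) (out : List (List Int)) : Prop := out = order_layer_alt layer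
instance (layer : List (Int × List Int)) (out : List (List Int)) : Decidable (Spec_order_layer layer out) := by unfold Spec_order_layer; infer_instance

-- ===== CLAIM (what is proved, stated in full; the proofs are below) =====
def Claim_equal_order_layer : Prop := ∀ (layer : List (Int × List Int)), Dom_order_layer layer → Pre_order_layer layer → Spec_order_layer layer (order_layer layer)

-- ===== LEMMAS AND PROOFS =====

-- Python's stable sort of a two-element list by key n[0]
lemma sorted_pair (x y : List Int) :
    PySem.List.sorted [x, y] (fun n => (PySem.List.pyGet? n 0).getD 0) false
      = if (PySem.List.pyGet? y 0).getD 0 < (PySem.List.pyGet? x 0).getD 0 then [y, x] else [x, y] := by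
  rw [PySem.List.sorted_eq_foldl_insertBy]
  simp only [List.foldl, PySem.List.insertBy]
  split_ifs with h <;> simp_all

-- inserting at position |a| + 1 of [e0] ++ a ++ t lands between a and t
lemma insert_mid (e0 v : List Int) (a t : List (List Int)) :
    PySem.List.insert ([e0] ++ a ++ t) ((a.length + 1 : Nat) : Int) v = [e0] ++ a ++ v :: t := by
  rw [List.append_assoc, PySem.List.insert_natCast _ _ _ (by simp)]
  have h1 : List.take (a.length + 1) ([e0] ++ (a ++ t)) = [e0] ++ a := by
    rw [← List.append_assoc, List.take_left' (by simp)]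
  have h2 : List.drop (a.length + 1) ([e0] ++ (a ++ t)) = t := by
    rw [← List.append_assoc, List.drop_left' (by simp)]
  rw [h1, h2, List.append_assoc]

-- the midpoint index of an odd-length list, as computed by the Python
lemma mid_eq (e0 : List Int) (a b : List (List Int)) (h : a.length = b.length) :
    PySem.Int.floordiv ((([e0] ++ a ++ b.reverse).length : Int)) 2 + 1 = ((a.length + 1 : Nat) : Int) := by
  rw [PySem.Int.floordiv_eq_ediv_of_pos (by norm_num)]
  simp only [List.length_append, List.length_reverse, List.length_cons, List.length_nil, h]
  push_cast
  omega

-- one loop step: A's two midpoint insertions = B's two bucket appends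
lemma step_eq (e0 : List Int) (a b : List (List Int)) (h : a.length = b.length)
    (ik : (Int × List Int) × (Int × List Int)) :
    order_layer_aStep ([e0] ++ a ++ b.reverse) ik
      = [e0] ++ (order_layer_bStep (a, b) ik).1 ++ (order_layer_bStep (a, b) ik).2.reverse := by
  unfold order_layer_aStep order_layer_bStep
  rw [sorted_pair, mid_eq e0 a b h]
  have g0 : ∀ (u v : List Int), (PySem.List.pyGet? [u, v] 0).getD ([] : List Int) = u := fun u v => rfl
  have g1 : ∀ (u v : List Int), (PySem.List.pyGet? [u, v] 1).getD ([] : List Int) = v := fun u v => rfl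
  split_ifs with hc <;> dsimp only <;> rw [g1, g0, insert_mid, insert_mid] <;> simp

-- the loop invariant: A's accumulator is always [e0] ++ front ++ reverse back
lemma loop_eq (pairs : List ((Int × List Int) × (Int × List Int))) (e0 : List Int)
    (a b : List (List Int)) (h : a.length = b.length) :
    pairs.foldl order_layer_aStep ([e0] ++ a ++ b.reverse)
      = [e0] ++ (pairs.foldl order_layer_bStep (a, b)).1
             ++ (pairs.foldl order_layer_bStep (a, b)).2.reverse := by
  induction pairs generalizing a b with
  | nil => simp
  | cons ik t ih =>
    simp only [List.foldl_cons]
    rw [step_eq e0 a b h ik]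
    have hlen : (order_layer_bStep (a, b) ik).1.length = (order_layer_bStep (a, b) ik).2.length := by
      unfold order_layer_bStep; split_ifs <;> simp [h]
    have := ih (order_layer_bStep (a, b) ik).1 (order_layer_bStep (a, b) ik).2 hlen
    simpa using this

lemma bStep_len (pairs : List ((Int × List Int) × (Int × List Int))) :
    (pairs.foldl order_layer_bStep ([], [])).1.length
      = (pairs.foldl order_layer_bStep ([], [])).2.length := by
  suffices h : ∀ a b : List (List Int), a.length = b.length →
      (pairs.foldl order_layer_bStep (a, b)).1.length
        = (pairs.foldl order_layer_bStep (a, b)).2.length by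
    exact h [] [] rfl
  induction pairs with
  | nil => intro a b h; simpa using h
  | cons ik t ih =>
    intro a b h
    simp only [List.foldl_cons]
    have hlen : (order_layer_bStep (a, b) ik).1.length = (order_layer_bStep (a, b) ik).2.length := by
      unfold order_layer_bStep; split_ifs <;> simp [h]
    have := ih (order_layer_bStep (a, b) ik).1 (order_layer_bStep (a, b) ik).2 hlen
    simpa using this

-- ===== VERDICT (by name: the statement is the Claim_ definition above) =====
theorem order_layer_spec : Claim_equal_order_layer := by
  intro layer _ _
  unfold Spec_order_layer order_layer order_layer_alt
  simp only []
  set e0 := ((PySem.List.pyGet? layer 0).getD (0, [])).2 with he0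
  set rest := layer.tail with hrest
  set pairs := List.zip ((PySem.List.slice? rest (some 0) none 2).getD [])
                        ((PySem.List.slice? rest (some 1) none 2).getD []) with hpairs
  have h0 : ([e0] : List (List Int)) = [e0] ++ ([] : List (List Int)) ++ ([] : List (List Int)).reverse := by simp
  rw [h0, loop_eq pairs e0 [] [] rfl]
  rw [mid_eq e0 _ _ (bStep_len pairs), insert_mid]
  simp
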